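-- pv_equiv track=rewrite | github.com/scrapy/scrapy | .scrapy/lib/python3.5/site-packages/twisted/names/authority.py | collapseContinuations
-- ===== SOURCE A (Python) =====
-- def collapseContinuations(lines):
--     L = []
--     state = 0
--     for line in lines:
--         if state == 0:
--             if line.find('(') == -1:
--                 L.append(line)
--             else:
--                 L.append(line[:line.find('(')])
--                 state = 1
--         else:
--             if line.find(')') != -1:
--                 L[-1] += ' ' + line[:line.find(')')]
--                 state = 0
--             else:
--                 L[-1] += ' ' + line
--     lines = L
--     L = []
--     for line in lines:
--         L.append(line.split())
--     return filter(None, L)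
-- ===== SOURCE B (Python) =====
-- def collapseContinuations(lines):
--     result = []
--     i = 0
--     n = len(lines)
--     while i < n:
--         line = lines[i]
--         i += 1
--         p = line.find('(')
--         if p == -1:
--             result.append(line.split())
--             continue
--         tokens = line[:p].split()
--         while i < n:
--             cont = lines[i]
--             i += 1
--             q = cont.find(')')
--             if q == -1:
--                 tokens.extend(cont.split())
--             else:
--                 tokens.extend(cont[:q].split())
--                 break
--         result.append(tokens)
--     return filter(None, result)
-- ===== Notes on version B (the rewrite author's own statement) =====
-- stated objective: simpler
-- what changed: Replaced A's state-flag fold that accumulates collapsed lines as strings plus a second split-and-filter pass by a single nested-loop pass (outer loop per group, inner loop consuming continuation lines until ')') that builds the token lists directly, with no state variable and no intermediate joined strings.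
import Mathlib
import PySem

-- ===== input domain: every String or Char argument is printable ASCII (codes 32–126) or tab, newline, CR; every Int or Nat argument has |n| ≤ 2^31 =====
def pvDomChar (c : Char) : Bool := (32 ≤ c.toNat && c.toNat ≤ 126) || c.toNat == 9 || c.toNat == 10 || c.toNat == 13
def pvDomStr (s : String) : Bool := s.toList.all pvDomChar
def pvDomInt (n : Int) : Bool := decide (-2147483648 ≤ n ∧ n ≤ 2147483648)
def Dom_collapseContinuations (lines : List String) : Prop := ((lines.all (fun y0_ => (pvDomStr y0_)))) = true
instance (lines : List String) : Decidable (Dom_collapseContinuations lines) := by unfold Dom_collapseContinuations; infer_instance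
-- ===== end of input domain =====

-- B replaces A's state-flag fold plus second split-and-filter pass by a nested-loop
-- single pass building token lists directly (objective: simpler/alternative).
-- Both Pythons return the same sequence of non-empty token lists (A via filter(None, ·),
-- B likewise); equivalence is about that returned sequence.

-- ===== PORT A =====
-- `L[-1] += x` on a NONEMPTY list; the empty case is unreachable from A's start state
-- (state 1 is only entered right after an append), ported as the identity there.
def pvUpdLast : List String → (String → String) → List String
  | [], _ => []
  | [x], f => [f x]
  | x :: xs, f => x :: pvUpdLast xs f

def pvStepA (st : List String × Int) (line : String) : List String × Int :=
  let L := st.1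
  let state := st.2
  if state == 0 then
    if PySem.Str.find line "(" == -1 then (L ++ [line], state)
    else (L ++ [PySem.Str.slice line none (some (PySem.Str.find line "("))], 1)
  else
    if PySem.Str.find line ")" != -1 then
      (pvUpdLast L (fun s => s ++ " " ++ PySem.Str.slice line none (some (PySem.Str.find line ")"))), 0)
    else
      (pvUpdLast L (fun s => s ++ " " ++ line), state)

def collapseContinuations (lines : List String) : List (List String) :=
  -- first loop: collapse continuations; second loop: split; then filter(None, ·)
  (((lines.foldl pvStepA ([], 0)).1).map (fun line => PySem.Str.split₀ line)).filter
    (fun t => !t.isEmpty)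

-- ===== PORT B =====
-- inner while loop: consume continuation lines until a ')' line, extending `tokens`
def pvInnerB (tokens : List String) : List String → List String × List String
  | [] => (tokens, [])
  | cont :: rest =>
      let q := PySem.Str.find cont ")"
      if q == -1 then pvInnerB (tokens ++ PySem.Str.split₀ cont) rest
      else (tokens ++ PySem.Str.split₀ (PySem.Str.slice cont none (some q)), rest)

theorem pvInnerB_snd_length (tokens : List String) (ls : List String) :
    (pvInnerB tokens ls).2.length ≤ ls.length := by
  induction ls generalizing tokens with
  | nil => simp [pvInnerB]
  | cons c rest ih =>
      simp only [pvInnerB]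
      split
      · exact Nat.le_trans (ih _) (Nat.le_succ _)
      · simp

def pvOuterB : List String → List (List String)
  | [] => []
  | line :: rest =>
      let p := PySem.Str.find line "("
      if p == -1 then PySem.Str.split₀ line :: pvOuterB rest
      else
        let r := pvInnerB (PySem.Str.split₀ (PySem.Str.slice line none (some p))) rest
        r.1 :: pvOuterB r.2
  termination_by ls => ls.length
  decreasing_by
  · simp
  · exact Nat.lt_succ_of_le (pvInnerB_snd_length _ rest)

def collapseContinuations_alt (lines : List String) : List (List String) :=
  (pvOuterB lines).filter (fun t => !t.isEmpty)

-- ===== PRECONDITION & SPEC =====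
def Spec_collapseContinuations (lines : List String) (out : List (List String)) : Prop := out = collapseContinuations_alt lines
instance (lines : List String) (out : List (List String)) : Decidable (Spec_collapseContinuations lines out) := by unfold Spec_collapseContinuations; infer_instance

-- ===== CLAIM (what is proved, stated in full; the proofs are below) =====
def Claim_equal_collapseContinuations : Prop := ∀ (lines : List String), Dom_collapseContinuations lines → Spec_collapseContinuations lines (collapseContinuations lines)

-- ===== LEMMAS AND PROOFS =====

-- string-level mirror of B's inner loop, used only to factor the proof
def pvStrInner (s : String) : List String → String × List String
  | [] => (s, [])
  | cont :: rest =>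
      let q := PySem.Str.find cont ")"
      if q == -1 then pvStrInner (s ++ " " ++ cont) rest
      else (s ++ " " ++ PySem.Str.slice cont none (some q), rest)

theorem pvStrInner_snd_length (s : String) (ls : List String) :
    (pvStrInner s ls).2.length ≤ ls.length := by
  induction ls generalizing s with
  | nil => simp [pvStrInner]
  | cons c rest ih =>
      simp only [pvStrInner]
      split
      · exact Nat.le_trans (ih _) (Nat.le_succ _)
      · simp

theorem pvSplitGo_acc (cs : List Char) (cur : List Char) (acc : List (List Char)) :
    PySem.Chars.split₀.go cs cur acc = acc.reverse ++ PySem.Chars.split₀.go cs cur [] := by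
  induction cs generalizing cur acc with
  | nil =>
      by_cases h : cur.isEmpty
      · simp [PySem.Chars.split₀.go, h]
      · simp [PySem.Chars.split₀.go, h]
  | cons c rest ih =>
      by_cases hs : PySem.Chars.isspace c
      · by_cases h : cur.isEmpty
        · simp only [PySem.Chars.split₀.go, hs, h, if_true]
          exact ih [] acc
        · simp only [PySem.Chars.split₀.go, hs, h, if_true, if_false, Bool.false_eq_true]
          rw [ih [] (cur.reverse :: acc), ih [] [cur.reverse]]
          simp
      · simp only [PySem.Chars.split₀.go, hs, Bool.false_eq_true, if_false]
        exact ih (c :: cur) acc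

-- split() distributes over joining with a single space (Chars level)
theorem pvSplitGo_space (a b : List Char) (cur : List Char) :
    PySem.Chars.split₀.go (a ++ ' ' :: b) cur [] =
      PySem.Chars.split₀.go a cur [] ++ PySem.Chars.split₀.go b [] [] := by
  induction a generalizing cur with
  | nil =>
      have hsp : PySem.Chars.isspace ' ' = true := by decide
      by_cases h : cur.isEmpty
      · simp only [List.nil_append, PySem.Chars.split₀.go, hsp, h, if_true]
        simp
      · simp only [List.nil_append, PySem.Chars.split₀.go, hsp, h, if_true, if_false,
          Bool.false_eq_true]
        rw [pvSplitGo_acc b [] [cur.reverse]]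
  | cons c rest ih =>
      by_cases hs : PySem.Chars.isspace c
      · by_cases h : cur.isEmpty
        · simp only [List.cons_append, PySem.Chars.split₀.go, hs, h, if_true]
          exact ih []
        · simp only [List.cons_append, PySem.Chars.split₀.go, hs, h, if_true, if_false,
            Bool.false_eq_true]
          rw [pvSplitGo_acc (rest ++ ' ' :: b) [] [cur.reverse],
            pvSplitGo_acc rest [] [cur.reverse], ih]
          simp
      · simp only [List.cons_append, PySem.Chars.split₀.go, hs, Bool.false_eq_true, if_false]
        exact ih (c :: cur)

theorem pvSplit₀_append_space (s t : String) :
    PySem.Str.split₀ (s ++ " " ++ t) = PySem.Str.split₀ s ++ PySem.Str.split₀ t := by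
  have hinj : Function.Injective (List.map String.toList) :=
    List.map_injective_iff.mpr (fun a b h => String.toList_injective h)
  apply hinj
  rw [List.map_append, PySem.Str.split₀_map_toList, PySem.Str.split₀_map_toList,
    PySem.Str.split₀_map_toList]
  have h2 : (s ++ " " ++ t).toList = s.toList ++ ' ' :: t.toList := by
    simp [String.toList_append]
  rw [h2]
  exact pvSplitGo_space s.toList t.toList []

theorem pvInner_eq_strInner (ls : List String) (s : String) :
    pvInnerB (PySem.Str.split₀ s) ls =
      (PySem.Str.split₀ (pvStrInner s ls).1, (pvStrInner s ls).2) := by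
  induction ls generalizing s with
  | nil => simp [pvInnerB, pvStrInner]
  | cons c rest ih =>
      simp only [pvInnerB, pvStrInner]
      split
      · rw [← pvSplit₀_append_space, ih]
      · rw [← pvSplit₀_append_space]

theorem pvUpdLast_append (L : List String) (s : String) (f : String → String) :
    pvUpdLast (L ++ [s]) f = L ++ [f s] := by
  induction L with
  | nil => simp [pvUpdLast]
  | cons x xs ih =>
      cases xs with
      | nil => simp [pvUpdLast]
      | cons y ys => simpa [pvUpdLast] using ih

-- A's fold in state 1 runs exactly one pvStrInner round on the last element
theorem pvFold1 (ls : List String) (L : List String) (s : String) :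
    (ls.foldl pvStepA (L ++ [s], 1)).1 =
      ((pvStrInner s ls).2.foldl pvStepA (L ++ [(pvStrInner s ls).1], 0)).1 := by
  induction ls generalizing s with
  | nil => simp [pvStrInner]
  | cons c rest ih =>
      by_cases hq : PySem.Chars.find c.toList [')'] = -1
      · have hst : pvStepA (L ++ [s], 1) c = (L ++ [s ++ " " ++ c], 1) := by
          simp [pvStepA, hq, pvUpdLast_append]
        have hsi : pvStrInner s (c :: rest) = pvStrInner (s ++ " " ++ c) rest := by
          simp [pvStrInner, hq]
        rw [List.foldl_cons, hst, hsi]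
        exact ih (s ++ " " ++ c)
      · have hst : pvStepA (L ++ [s], 1) c =
            (L ++ [s ++ " " ++ PySem.Str.slice c none (some (PySem.Str.find c ")"))], 0) := by
          simp [pvStepA, hq, pvUpdLast_append]
        have hsi : pvStrInner s (c :: rest) =
            (s ++ " " ++ PySem.Str.slice c none (some (PySem.Str.find c ")")), rest) := by
          simp [pvStrInner, hq]
        rw [List.foldl_cons, hst, hsi]

-- main invariant: the mapped-split of A's fold result is B's outer recursion
theorem pvMain (n : Nat) (ls : List String) (h : ls.length ≤ n) (L : List String) :
    ((ls.foldl pvStepA (L, 0)).1).map PySem.Str.split₀ =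
      L.map PySem.Str.split₀ ++ pvOuterB ls := by
  induction n generalizing ls L with
  | zero =>
      have he : ls = [] := List.eq_nil_of_length_eq_zero (Nat.le_zero.mp h)
      simp [he, pvOuterB]
  | succ m ih =>
      cases ls with
      | nil => simp [pvOuterB]
      | cons line rest =>
          have hr : rest.length ≤ m := Nat.lt_succ_iff.mp (by simpa using h)
          rw [List.foldl_cons]
          by_cases hp : PySem.Chars.find line.toList ['('] = -1
          · have hst : pvStepA (L, 0) line = (L ++ [line], 0) := by
              simp [pvStepA, hp]
            rw [hst, ih rest hr (L ++ [line])]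
            have ho : pvOuterB (line :: rest) = PySem.Str.split₀ line :: pvOuterB rest := by
              rw [pvOuterB]
              simp [hp]
            rw [ho]
            simp
          · have hst : pvStepA (L, 0) line =
                (L ++ [PySem.Str.slice line none (some (PySem.Str.find line "("))], 1) := by
              simp [pvStepA, hp]
            rw [hst, pvFold1 rest L (PySem.Str.slice line none (some (PySem.Str.find line "(")))]
            have hlen : (pvStrInner (PySem.Str.slice line none (some (PySem.Str.find line "("))) rest).2.length ≤ m := by
              have h1 := pvStrInner_snd_length (PySem.Str.slice line none (some (PySem.Str.find line "("))) rest
              omega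
            rw [ih _ hlen]
            have ho : pvOuterB (line :: rest) =
                (pvInnerB (PySem.Str.split₀ (PySem.Str.slice line none (some (PySem.Str.find line "(")))) rest).1
                  :: pvOuterB (pvInnerB (PySem.Str.split₀ (PySem.Str.slice line none (some (PySem.Str.find line "(")))) rest).2 := by
              rw [pvOuterB]
              simp [hp]
            rw [ho, pvInner_eq_strInner]
            simp

-- ===== VERDICT (by name: the statement is the Claim_ definition above) =====
theorem collapseContinuations_spec : Claim_equal_collapseContinuations := by
  intro lines _
  unfold Spec_collapseContinuations collapseContinuations collapseContinuations_alt
  rw [show (fun line => PySem.Str.split₀ line) = PySem.Str.split₀ from rfl,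
    pvMain lines.length lines (le_refl _) []]
  simp
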